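-- pv_equiv track=rewrite | github.com/aniketW42/BluePineapple | Python Programs/109.py | count_odd_binary_rotations1
-- ===== SOURCE A (Python) =====
-- def count_odd_binary_rotations1(binary_str: str) -> int:
--     n = len(binary_str)
--     count = 0
--
--     for i in range(n):
--         binary_str = binary_str[-1] + binary_str[:-1]
--         if binary_str[-1] == "1":
--             count += 1
--
--     return count
-- ===== SOURCE B (Python) =====
-- def count_odd_binary_rotations1(binary_str: str) -> int:
--     # The n right-rotations end with each character of the original string
--     # exactly once, so counting the one-digits counts the odd rotations.
--     return binary_str.count("1")
-- ===== Notes on version B (the rewrite author's own statement) =====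
-- stated objective: faster
-- what changed: Replaced the quadratic loop that materialises every rotation by slicing and tests its last character with a single linear count of the one-digits, since the n rotations end in each character of the string exactly once.
import Mathlib
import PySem

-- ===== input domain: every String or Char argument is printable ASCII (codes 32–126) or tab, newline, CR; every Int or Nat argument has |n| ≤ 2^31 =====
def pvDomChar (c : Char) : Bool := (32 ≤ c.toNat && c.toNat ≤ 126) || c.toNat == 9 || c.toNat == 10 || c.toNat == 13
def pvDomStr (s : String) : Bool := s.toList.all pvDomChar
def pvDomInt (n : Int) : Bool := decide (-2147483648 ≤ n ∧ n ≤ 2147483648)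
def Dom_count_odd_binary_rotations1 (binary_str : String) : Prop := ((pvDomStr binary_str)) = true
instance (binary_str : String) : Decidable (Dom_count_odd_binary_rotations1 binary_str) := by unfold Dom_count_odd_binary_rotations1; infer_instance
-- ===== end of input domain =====

-- B replaces A's quadratic rotate-and-test loop with a single count of '1'
-- characters (each rotation ends in a different character of the input), an
-- asymptotically faster O(n) pass.

-- ===== PORT A =====
-- One iteration of A's loop body: binary_str = binary_str[-1] + binary_str[:-1];
-- if binary_str[-1] == "1": count += 1.  (s[-1] raises IndexError on an empty
-- string in Python; here pyGet? returns none and .getD supplies a default, but the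
-- loop body only runs when n ≥ 1, so the string is never empty — exact on all inputs.)
def pvStepA (st : List Char × Int) : List Char × Int :=
  let s := (PySem.List.pyGet? st.1 (-1)).getD default :: PySem.List.slice st.1 none (some (-1))
  if (PySem.List.pyGet? s (-1)).getD default = '1' then (s, st.2 + 1) else (s, st.2)

def count_odd_binary_rotations1 (binary_str : String) : Int :=
  let n : Int := PySem.Str.len binary_str
  let r := (PySem.List.pyRange 0 n 1).foldl (fun (st : List Char × Int) (_i : Int) => pvStepA st)
    (binary_str.toList, 0)
  r.2

-- ===== PORT B =====
def count_odd_binary_rotations1_alt (binary_str : String) : Int :=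
  (PySem.Str.count binary_str "1" : Int)

-- ===== PRECONDITION & SPEC =====
def Spec_count_odd_binary_rotations1 (binary_str : String) (out : Int) : Prop := out = count_odd_binary_rotations1_alt binary_str
instance (binary_str : String) (out : Int) : Decidable (Spec_count_odd_binary_rotations1 binary_str out) := by unfold Spec_count_odd_binary_rotations1; infer_instance

-- ===== CLAIM (what is proved, stated in full; the proofs are below) =====
def Claim_equal_count_odd_binary_rotations1 : Prop := ∀ (binary_str : String), Dom_count_odd_binary_rotations1 binary_str → Spec_count_odd_binary_rotations1 binary_str (count_odd_binary_rotations1 binary_str)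

-- ===== LEMMAS AND PROOFS =====

-- The fold in A ignores the loop index: it is an iterate of pvStepA.
theorem pv_foldl_iterate (L : List Int) (st : List Char × Int) :
    L.foldl (fun (st : List Char × Int) (_i : Int) => pvStepA st) st = pvStepA^[L.length] st := by
  induction L generalizing st with
  | nil => rfl
  | cons a L ih => simp [List.foldl_cons, ih, Function.iterate_succ_apply]

-- One step of A on a string written as m ++ [x]: the last char moves to the front
-- and the char tested afterwards is the last of the NEW string x :: m.
theorem pvStepA_concat (m : List Char) (x : Char) (c : Int) :
    pvStepA (m ++ [x], c) =
      (x :: m, c + (if (m.getLastD x) = '1' then 1 else 0)) := by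
  simp only [pvStepA]
  rw [PySem.List.pyGet?_neg_one_append_singleton, PySem.List.slice_to_neg_one,
    List.dropLast_concat]
  simp only [Option.getD_some, PySem.List.pyGet?_neg_one, List.getLast?_cons,
    List.getLastD_eq_getLast?]
  split_ifs with h <;> simp

-- countP of a nonempty list = countP of its dropLast + its last element's contribution.
theorem pv_countP_split (l : List Char) (h : l ≠ []) (p : Char → Bool) :
    (l.countP p : Int) = (l.dropLast.countP p : Int) + (if p (l.getLastD default) = true then 1 else 0) := by
  conv_lhs => rw [← List.dropLast_concat_getLast h]
  rw [List.countP_append]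
  have : l.getLastD default = l.getLast h := by
    rw [List.getLastD_eq_getLast?, List.getLast?_eq_getLast_of_ne_nil h]; rfl
  rw [this]
  split_ifs with hp <;> simp [hp]

-- Running |t| steps of A from w ++ t rotates t to the front; the tested characters
-- are the last of w followed by all of t except its last — i.e. (w.getLastD _ :: t).dropLast.
theorem pv_iter_rot (t : List Char) : ∀ (w : List Char) (c : Int), w ≠ [] →
    pvStepA^[t.length] (w ++ t, c) =
      (t ++ w, c + (((w.getLastD default :: t).dropLast).countP (fun ch => ch == '1') : Int)) := by
  induction t using List.reverseRecOn with
  | nil => intro w c _; simp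
  | append_singleton m x ih =>
    intro w c hw
    have hlen : (m ++ [x]).length = m.length + 1 := by simp
    rw [hlen, Function.iterate_succ_apply, ← List.append_assoc, pvStepA_concat]
    have hxw : (x :: w) ≠ [] := by simp
    have := ih (x :: w) (c + (if ((w ++ m).getLastD x) = '1' then 1 else 0)) hxw
    rw [show (x :: w) ++ m = x :: (w ++ m) from rfl] at this
    rw [this]
    simp only [Prod.mk.injEq]
    refine ⟨by simp, ?_⟩
    · -- arithmetic on the counted characters
      have hgl : (x :: w).getLastD default = w.getLastD default := by
        cases w with
        | nil => cases hw rfl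
        | cons b bs => rw [List.getLastD_cons, List.getLastD_cons, List.getLastD_cons]
      set gl := w.getLastD default with hgl'
      have hdl : ((gl :: (m ++ [x])).dropLast) = gl :: m := by
        rw [show gl :: (m ++ [x]) = (gl :: m) ++ [x] from rfl, List.dropLast_concat]
      rw [hdl, hgl]
      have hsplit := pv_countP_split (gl :: m) (by simp) (fun ch => ch == '1')
      have hlast : (w ++ m).getLastD x = (gl :: m).getLastD default := by
        cases m with
        | nil =>
          simp only [List.append_nil, List.getLastD_cons, List.getLastD_nil, hgl']
          cases w with
          | nil => cases hw rfl
          | cons b bs => rw [List.getLastD_cons, List.getLastD_cons]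
        | cons y ys =>
          rw [List.getLastD_eq_getLast?, List.getLastD_eq_getLast?,
            List.getLast?_append_of_ne_nil w (by simp)]
          simp [List.getLast?_cons]
      rw [hlast]
      rw [hsplit]
      split_ifs with h1 h2 h2 <;> simp_all <;> ring

-- B's count of the one-character substring "1" is countP (· == '1').
theorem pv_count_go_one (l : List Char) : ∀ (fuel : Nat) (acc : Nat), l.length ≤ fuel →
    PySem.Chars.count.go ['1'] fuel l acc = acc + l.countP (fun ch => ch == '1') := by
  induction l with
  | nil => intro fuel acc _; cases fuel <;> simp [PySem.Chars.count.go]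
  | cons h t ih =>
    intro fuel acc hf
    cases fuel with
    | zero => simp at hf
    | succ fuel =>
      have hf' : t.length ≤ fuel := by simpa using hf
      by_cases hh : h = '1'
      · have hpre : List.isPrefixOf ['1'] (h :: t) = true := by simp [List.isPrefixOf, hh]
        simp [PySem.Chars.count.go, hpre, ih fuel (acc + 1) hf', List.countP_cons, hh]
        omega
      · have hpre : List.isPrefixOf ['1'] (h :: t) = false := by
          simp [List.isPrefixOf]
          exact fun e => hh e.symm
        have hgo : PySem.Chars.count.go ['1'] (fuel + 1) (h :: t) acc =
            PySem.Chars.count.go ['1'] fuel t acc := by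
          simp [PySem.Chars.count.go, hpre]
        rw [hgo, ih fuel acc hf', List.countP_cons]
        simp [hh]

theorem pv_alt_eq (s : String) :
    count_odd_binary_rotations1_alt s = (s.toList.countP (fun ch => ch == '1') : Int) := by
  unfold count_odd_binary_rotations1_alt
  rw [PySem.Str.count_eq]
  show ((PySem.Chars.count s.toList "1".toList : Nat) : Int) = _
  have h1 : "1".toList = ['1'] := rfl
  rw [h1]
  unfold PySem.Chars.count
  simp only [List.isEmpty_cons]
  rw [pv_count_go_one s.toList s.toList.length 0 le_rfl]
  simp

-- ===== VERDICT (by name: the statement is the Claim_ definition above) =====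
theorem count_odd_binary_rotations1_spec : Claim_equal_count_odd_binary_rotations1 := by
  intro s _
  unfold Spec_count_odd_binary_rotations1
  rw [pv_alt_eq]
  unfold count_odd_binary_rotations1
  rw [PySem.Str.len_eq]
  cases hl : s.toList with
  | nil => simp [PySem.List.pyRange]
  | cons a l' =>
    have hlen : PySem.Chars.len s.toList = ((a :: l').length : Int) := by
      rw [hl, PySem.Chars.len_eq]
    simp only [hlen]
    rw [pv_foldl_iterate, PySem.List.length_pyRange_one]
    have hn : (((a :: l').length : Int) - 0).toNat = l'.length + 1 := by simp
    rw [hn, Function.iterate_succ_apply']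
    have := pv_iter_rot l' [a] 0 (by simp)
    simp only [List.singleton_append] at this
    rw [this, pvStepA_concat]
    simp only [List.getLastD_cons, List.getLastD_nil] at *
    have hsplit := pv_countP_split (a :: l') (by simp) (fun ch => ch == '1')
    have hlast : (a :: l').getLastD default = l'.getLastD a := List.getLastD_cons ..
    rw [hlast] at hsplit
    split_ifs with h <;> simp_all
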